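-- pv_equiv track=rewrite | github.com/Akogare-Cafe/vibebuff | scripts/scraper/sync_to_convex.py | is_excluded_name
-- ===== SOURCE A (Python) =====
-- EXCLUDED_NAME_PATTERNS = [
--     "how to",
--     "how-to",
--     "guide to",
--     "tutorial",
--     "introduction to",
--     "getting started",
--     "best practices",
--     "tips and tricks",
--     "top 10",
--     "top 5",
--     "i tested",
--     "we tested",
--     "review:",
--     "comparison:",
--     "vs.",
--     "versus",
--     "alternatives",
--     "alternative to",
--     "build a",
--     "create a",
--     "make a",
--     "develop a",
--     "implement a",
--     "design a",
-- ]
--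
-- def is_excluded_name(name: str) -> bool:
--     name_lower = name.lower()
--     for pattern in EXCLUDED_NAME_PATTERNS:
--         if pattern in name_lower:
--             return True
--     if len(name) > 80:
--         return True
--     return False
-- ===== SOURCE B (Python) =====
-- EXCLUDED_NAME_PATTERNS = [
--     "how to",
--     "how-to",
--     "guide to",
--     "tutorial",
--     "introduction to",
--     "getting started",
--     "best practices",
--     "tips and tricks",
--     "top 10",
--     "top 5",
--     "i tested",
--     "we tested",
--     "review:",
--     "comparison:",
--     "vs.",
--     "versus",
--     "alternatives",
--     "alternative to",
--     "build a",
--     "create a",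
--     "make a",
--     "develop a",
--     "implement a",
--     "design a",
-- ]
--
-- def is_excluded_name(name: str) -> bool:
--     # single position-major scan: at each position of the lowercased name,
--     # test whether some excluded pattern starts there
--     low = name.lower()
--     if any(low.startswith(p, i)
--            for i in range(len(low))
--            for p in EXCLUDED_NAME_PATTERNS):
--         return True
--     return len(name) > 80
-- ===== Notes on version B (the rewrite author's own statement) =====
-- stated objective: alternative
-- what changed: Replaces A's pattern-major loop of 24 independent whole-string substring scans (one per pattern) with a single position-major scan of the lowercased name that tests at each position whether any excluded pattern starts there.
import Mathlib
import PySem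

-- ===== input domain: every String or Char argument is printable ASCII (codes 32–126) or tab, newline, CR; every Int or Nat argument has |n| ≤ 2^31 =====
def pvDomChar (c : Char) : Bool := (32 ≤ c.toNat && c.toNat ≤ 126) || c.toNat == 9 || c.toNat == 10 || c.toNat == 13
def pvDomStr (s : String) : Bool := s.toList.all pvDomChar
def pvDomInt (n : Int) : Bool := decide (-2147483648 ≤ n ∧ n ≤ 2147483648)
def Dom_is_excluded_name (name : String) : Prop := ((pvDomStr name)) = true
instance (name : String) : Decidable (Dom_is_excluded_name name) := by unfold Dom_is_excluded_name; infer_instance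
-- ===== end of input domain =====

-- B replaces A's pattern-major loop of 24 independent substring scans by one
-- position-major scan of the lowercased name (alternative decomposition, same cost class).

-- ===== PORT A =====
def pyExcludedNamePatterns : List String :=
  ["how to", "how-to", "guide to", "tutorial", "introduction to",
   "getting started", "best practices", "tips and tricks", "top 10", "top 5",
   "i tested", "we tested", "review:", "comparison:", "vs.", "versus",
   "alternatives", "alternative to", "build a", "create a", "make a",
   "develop a", "implement a", "design a"]

-- 'for pattern in EXCLUDED_NAME_PATTERNS: if pattern in name_lower: return True'
def isExcludedLoopA (nameLower : String) : List String → Option Bool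
  | [] => none
  | p :: rest =>
      if PySem.Str.isIn p nameLower then some true else isExcludedLoopA nameLower rest

def is_excluded_name (name : String) : Bool :=
  let nameLower := PySem.Str.lower name
  match isExcludedLoopA nameLower pyExcludedNamePatterns with
  | some b => b
  | none => if PySem.Str.len name > 80 then true else false

-- ===== PORT B =====
-- 'any(low.startswith(p, i) for i in range(len(low)) for p in EXCLUDED_NAME_PATTERNS)'
def scanPosB (pats : List (List Char)) : List Char → Bool
  | [] => false
  | c :: rest =>
      (pats.any fun p => PySem.Chars.startswith (c :: rest) p) || scanPosB pats rest

def is_excluded_name_alt (name : String) : Bool :=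
  let low := PySem.Chars.lower name.toList
  if scanPosB (pyExcludedNamePatterns.map String.toList) low then true
  else decide (PySem.Str.len name > 80)

-- ===== PRECONDITION & SPEC =====
def Spec_is_excluded_name (name : String) (out : Bool) : Prop := out = is_excluded_name_alt name
instance (name : String) (out : Bool) : Decidable (Spec_is_excluded_name name out) := by unfold Spec_is_excluded_name; infer_instance

-- ===== CLAIM (what is proved, stated in full; the proofs are below) =====
def Claim_equal_is_excluded_name : Prop := ∀ (name : String), Dom_is_excluded_name name → Spec_is_excluded_name name (is_excluded_name name)

-- ===== LEMMAS AND PROOFS =====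

-- B's position-major scan tests exactly 'some pattern is an infix', given no pattern is empty.
theorem scanPosB_eq_any_isIn (pats : List (List Char)) (hne : ∀ p ∈ pats, p ≠ []) :
    ∀ l : List Char, scanPosB pats l = pats.any (fun p => PySem.Chars.isIn p l) := by
  intro l
  induction l with
  | nil =>
    simp only [scanPosB]
    symm
    simp only [Bool.eq_false_iff, ne_eq, List.any_eq_true, not_exists, not_and]
    intro p hp
    rw [Bool.not_eq_true, PySem.Chars.isIn_eq_false_iff]
    simp [hne p hp]
  | cons c rest ih =>
    simp only [scanPosB, ih]
    apply Bool.eq_iff_iff.mpr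
    simp only [Bool.or_eq_true, List.any_eq_true]
    constructor
    · rintro (⟨p, hp, hsw⟩ | ⟨p, hp, hin⟩)
      · exact ⟨p, hp, (PySem.Chars.isIn_iff_infix _ _).mpr
          ((PySem.Chars.startswith_iff _ _).mp hsw).isInfix⟩
      · refine ⟨p, hp, ?_⟩
        rw [PySem.Chars.isIn_iff_infix] at hin ⊢
        exact hin.trans (List.suffix_cons c rest).isInfix
    · rintro ⟨p, hp, hin⟩
      rw [PySem.Chars.isIn_iff_infix, List.infix_cons_iff] at hin
      rcases hin with hpre | hinf
      · exact Or.inl ⟨p, hp, (PySem.Chars.startswith_iff _ _).mpr hpre⟩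
      · exact Or.inr ⟨p, hp, (PySem.Chars.isIn_iff_infix _ _).mpr hinf⟩

-- A's early-return loop as an if over 'any'.
theorem isExcludedLoopA_eq (nameLower : String) (pats : List String) :
    isExcludedLoopA nameLower pats =
      (if pats.any (fun p => PySem.Str.isIn p nameLower) then some true else none) := by
  induction pats with
  | nil => simp [isExcludedLoopA]
  | cons p rest ih =>
    rw [isExcludedLoopA, ih, List.any_cons]
    by_cases h : PySem.Chars.isIn p.toList nameLower.toList = true <;>
      simp [PySem.Str.isIn_eq, h]

theorem pats_nonempty :
    ∀ p ∈ pyExcludedNamePatterns.map String.toList, p ≠ [] := by decide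

-- ===== VERDICT (by name: the statement is the Claim_ definition above) =====
theorem is_excluded_name_spec : Claim_equal_is_excluded_name := by
  intro name _
  unfold Spec_is_excluded_name is_excluded_name is_excluded_name_alt
  dsimp only
  rw [isExcludedLoopA_eq, scanPosB_eq_any_isIn _ pats_nonempty]
  by_cases h : ∃ x ∈ pyExcludedNamePatterns,
      PySem.Chars.isIn x.toList (PySem.Chars.lower name.toList) = true
  · simp [PySem.Str.isIn_eq, PySem.Str.toList_lower, List.any_map, List.any_eq_true, h]
  · simp [PySem.Str.isIn_eq, PySem.Str.toList_lower, List.any_map, List.any_eq_true, h]
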